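-- pv_equiv track=rewrite | github.com/pnucse-capstone/capstone-2023-1-32 | observer/observer.py | packetLoadToHex
-- ===== SOURCE A (Python) =====
-- def packetLoadToHex(original_s):
--     s = str(original_s)[2:-1]
--     hexList = []
--
--     i = 0
--     while i < len(s):
--         if s[i: i+2] == "\\x":
--             hexList.append( s[i+2: i+4] )
--             i += 4
--         elif s[i: i+2] == "\\r":
--             hexList.append( "0d" )
--             i += 2
--         else:
--             hexList.append( hex(ord(s[i]))[2:] )
--             i += 1
--     return hexList
-- ===== SOURCE B (Python) =====
-- def packetLoadToHex(original_s):
--     stack = list(str(original_s)[2:-1])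
--     stack.reverse()
--     out = []
--     while stack:
--         c = stack.pop()
--         if c == '\\' and stack and stack[-1] == 'x':
--             stack.pop()
--             h = stack.pop() if stack else ''
--             h += stack.pop() if stack else ''
--             out.append(h)
--         elif c == '\\' and stack and stack[-1] == 'r':
--             stack.pop()
--             out.append('0d')
--         else:
--             out.append(format(ord(c), 'x'))
--     return out
-- ===== Notes on version B (the rewrite author's own statement) =====
-- stated objective: alternative
-- what changed: Replaces A's index-arithmetic while-loop (two-character slice comparisons and manual i += 1/2/4 stepping) with a consuming-stack tokenizer that pops one character at a time and pattern-looks-ahead at the stack top, so no indices or slices are used at all.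
import Mathlib
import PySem

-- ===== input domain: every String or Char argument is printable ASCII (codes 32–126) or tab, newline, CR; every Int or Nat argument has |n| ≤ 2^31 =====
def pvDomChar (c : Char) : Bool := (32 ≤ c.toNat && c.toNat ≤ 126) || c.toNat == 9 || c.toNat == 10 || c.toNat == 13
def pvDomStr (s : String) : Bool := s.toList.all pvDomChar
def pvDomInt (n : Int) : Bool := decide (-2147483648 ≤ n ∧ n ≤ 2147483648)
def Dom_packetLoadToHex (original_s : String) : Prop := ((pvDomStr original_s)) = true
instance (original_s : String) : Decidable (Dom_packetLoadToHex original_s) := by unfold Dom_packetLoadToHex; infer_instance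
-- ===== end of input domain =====

-- B replaces A's index-arithmetic while-loop (slice comparisons, manual i += 1/2/4 stepping)
-- with a consuming-stack tokenizer that pops characters and pattern-looks-ahead; objective: alternative
-- (same single pass, no speed claim).

-- hex(n)[2:] for n : Nat (= format(n, 'x')): lowercase hex digits, no prefix, no padding
def pvHex (n : Nat) : String := String.ofList (Nat.toDigits 16 n)

-- ===== PORT A =====
-- the while-loop of A: index i over s, appending to hexList
def pvAGo (s : List Char) (hexList : List String) (i : Nat) : List String :=
  if h : i < s.length then
    if PySem.List.slice s (some (i : Int)) (some ((i : Int) + 2)) = ['\\', 'x'] then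
      pvAGo s (hexList ++ [String.ofList (PySem.List.slice s (some ((i : Int) + 2)) (some ((i : Int) + 4)))]) (i + 4)
    else if PySem.List.slice s (some (i : Int)) (some ((i : Int) + 2)) = ['\\', 'r'] then
      pvAGo s (hexList ++ ["0d"]) (i + 2)
    else
      pvAGo s (hexList ++ [pvHex (s[i].toNat)]) (i + 1)
  else hexList
termination_by s.length - i

def packetLoadToHex (original_s : String) : List String :=
  pvAGo (PySem.List.slice original_s.toList (some 2) (some (-1))) [] 0

-- ===== PORT B =====
-- the while-loop of Source B: the reversed char stack is consumed by pop() from its top,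
-- i.e. the char list is consumed from the front; out is the accumulator
def pvBGo (stack : List Char) (out : List String) : List String :=
  match stack with
  | [] => out
  | c :: rest =>
    if c = '\\' ∧ rest.head? = some 'x' then
      -- pop the 'x', then up to two more pops joined into h
      pvBGo (rest.tail.drop 2) (out ++ [String.ofList (rest.tail.take 2)])
    else if c = '\\' ∧ rest.head? = some 'r' then
      pvBGo rest.tail (out ++ ["0d"])
    else
      pvBGo rest (out ++ [pvHex c.toNat])
termination_by stack.length
decreasing_by all_goals simp only [List.length_drop, List.length_tail, List.length_cons]; omega

def packetLoadToHex_alt (original_s : String) : List String :=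
  pvBGo (PySem.List.slice original_s.toList (some 2) (some (-1))) []

-- ===== PRECONDITION & SPEC =====
def Spec_packetLoadToHex (original_s : String) (out : List String) : Prop := out = packetLoadToHex_alt original_s
instance (original_s : String) (out : List String) : Decidable (Spec_packetLoadToHex original_s out) := by unfold Spec_packetLoadToHex; infer_instance

-- ===== CLAIM (what is proved, stated in full; the proofs are below) =====
def Claim_equal_packetLoadToHex : Prop := ∀ (original_s : String), Dom_packetLoadToHex original_s → Spec_packetLoadToHex original_s (packetLoadToHex original_s)

-- ===== LEMMAS AND PROOFS =====

theorem pvAGo_eq (s : List Char) : ∀ (n i : Nat), s.length - i ≤ n → ∀ (acc : List String),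
    pvAGo s acc i = pvBGo (s.drop i) acc := by
  intro n
  induction n with
  | zero =>
    intro i hn acc
    have hlen : s.length ≤ i := by omega
    rw [pvAGo, dif_neg (by omega), List.drop_eq_nil_of_le hlen, pvBGo]
  | succ n ih =>
    intro i hn acc
    by_cases h : i < s.length
    · have hslice2 : PySem.List.slice s (some (i : Int)) (some ((i : Int) + 2)) = (s.drop i).take 2 := by
        have : ((i : Int) + 2) = ((i + 2 : Nat) : Int) := by push_cast; ring
        rw [this, PySem.List.slice_natCast]
        congr 1; omega
      have hslice4 : PySem.List.slice s (some ((i : Int) + 2)) (some ((i : Int) + 4)) = ((s.drop i).drop 2).take 2 := by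
        have h2 : ((i : Int) + 2) = ((i + 2 : Nat) : Int) := by push_cast; ring
        have h4 : ((i : Int) + 4) = ((i + 4 : Nat) : Int) := by push_cast; ring
        rw [h2, h4, PySem.List.slice_natCast, List.drop_drop]
        congr 1; omega
      rcases he : s.drop i with _ | ⟨c, r⟩
      · exact absurd he (by simp [List.drop_eq_nil_iff]; omega)
      have hget : s[i]'h = c := by
        have h0 : (s.drop i)[0]'(by simp [he]) = c := by simp [he]
        simpa [List.getElem_drop] using h0
      have hd1 : s.drop (i + 1) = r := by
        rw [← List.drop_drop, he]; rfl
      have hd2 : s.drop (i + 2) = r.drop 1 := by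
        rw [← List.drop_drop, he]; rfl
      have hd4 : s.drop (i + 4) = r.drop 3 := by
        rw [← List.drop_drop, he]; rfl
      rw [pvAGo, dif_pos h, hslice2, hslice4, he]
      rcases r with _ | ⟨d, r'⟩
      · -- one char left: both slices are [c], no pair matches
        rw [if_neg (by simp), if_neg (by simp), ih (i + 1) (by omega), hd1, hget]
        conv_rhs => rw [pvBGo]
        rw [if_neg (by simp), if_neg (by simp), pvBGo]
      · by_cases hc : c = '\\'
        · subst hc
          by_cases hx : d = 'x'
          · subst hx
            rw [if_pos (by simp), ih (i + 4) (by omega), hd4]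
            conv_rhs => rw [pvBGo]
            rw [if_pos (by simp)]
            simp
          · by_cases hr : d = 'r'
            · subst hr
              rw [if_neg (by simp), if_pos (by simp), ih (i + 2) (by omega), hd2]
              conv_rhs => rw [pvBGo]
              rw [if_neg (by simp), if_pos (by simp)]
              simp
            · rw [if_neg (by simp [hx]), if_neg (by simp [hr]), ih (i + 1) (by omega), hd1, hget]
              conv_rhs => rw [pvBGo]
              rw [if_neg (by simp [hx]), if_neg (by simp [hr])]
        · rw [if_neg (by simp [hc]), if_neg (by simp [hc]), ih (i + 1) (by omega), hd1, hget]
          conv_rhs => rw [pvBGo]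
          rw [if_neg (by simp [hc]), if_neg (by simp [hc])]
    · rw [pvAGo, dif_neg h, List.drop_eq_nil_of_le (by omega), pvBGo]

-- ===== VERDICT (by name: the statement is the Claim_ definition above) =====
theorem packetLoadToHex_spec : Claim_equal_packetLoadToHex := by
  intro s _
  unfold Spec_packetLoadToHex packetLoadToHex packetLoadToHex_alt
  rw [pvAGo_eq _ (PySem.List.slice s.toList (some 2) (some (-1))).length 0 (by omega)]
  simp
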